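-- pv_equiv track=rewrite | github.com/Ing-Josef-Klotzner/python | 2017/hackerrank/CardsPermutation.py | getnP
-- ===== SOURCE A (Python) =====
-- def update (bit, i, v):
--     n = len (bit)
--     while i < n:
--         bit [i] += v
--         i += i & (-i)
--
-- def getsum (bit, i):
--     s = 0
--     while i > 0:
--         s += bit [i]
--         i -= i& (-i)
--     return s
--
-- def getnP (P, fixed):
--     n = len (P)
--     m = max (P)
--     nI = [0]
--     for i in range (2, n + 1):
--         nI.append (nI [-1] + fixed [i - 2] )
--     bit = [0 for i in range (m + 1)]
--     nP = [0 for i in range (n)]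
--     for i in range (n - 1, -1, -1):
--         if P [i] > 0:
--             nP [i] = nI [P [i] - 1] - getsum (bit, P [i] - 1)
--             update (bit, P [i], 1)
--         else:
--             nP [i] = -1
--     nP [0] = 0
--     return nP
-- ===== SOURCE B (Python) =====
-- def _count_less(seen, x):
--     # first index whose element is >= x in the ascending list `seen` (= bisect_left)
--     lo, hi = 0, len(seen)
--     while lo < hi:
--         mid = (lo + hi) // 2
--         if seen[mid] < x:
--             lo = mid + 1
--         else:
--             hi = mid
--     return lo
--
-- def _insert_sorted(seen, x):
--     # insert x after any equal elements (= bisect.insort)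
--     lo, hi = 0, len(seen)
--     while lo < hi:
--         mid = (lo + hi) // 2
--         if x < seen[mid]:
--             hi = mid
--         else:
--             lo = mid + 1
--     seen.insert(lo, x)
--
-- def getnP(P, fixed):
--     n = len(P)
--     nI = [0]
--     acc = 0
--     for v in fixed[:n - 1]:
--         acc += v
--         nI.append(acc)
--     seen = []          # ascending list of the positive values already scanned
--     nP = [0] * n
--     for i in range(n - 1, -1, -1):
--         p = P[i]
--         if p > 0:
--             nP[i] = nI[p - 1] - _count_less(seen, p)
--             _insert_sorted(seen, p)
--         else:
--             nP[i] = -1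
--     nP[0] = 0
--     return nP
-- ===== Notes on version B (the rewrite author's own statement) =====
-- stated objective: simpler
-- what changed: The Fenwick (binary indexed) tree with its lowbit update/getsum loops is replaced by an ascending list of the already-scanned positive values, queried with a hand-written bisect_left binary search and maintained with a bisect.insort-style sorted insertion; the prefix-sum table nI is built with a running accumulator over fixed[:n-1].
import Mathlib
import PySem

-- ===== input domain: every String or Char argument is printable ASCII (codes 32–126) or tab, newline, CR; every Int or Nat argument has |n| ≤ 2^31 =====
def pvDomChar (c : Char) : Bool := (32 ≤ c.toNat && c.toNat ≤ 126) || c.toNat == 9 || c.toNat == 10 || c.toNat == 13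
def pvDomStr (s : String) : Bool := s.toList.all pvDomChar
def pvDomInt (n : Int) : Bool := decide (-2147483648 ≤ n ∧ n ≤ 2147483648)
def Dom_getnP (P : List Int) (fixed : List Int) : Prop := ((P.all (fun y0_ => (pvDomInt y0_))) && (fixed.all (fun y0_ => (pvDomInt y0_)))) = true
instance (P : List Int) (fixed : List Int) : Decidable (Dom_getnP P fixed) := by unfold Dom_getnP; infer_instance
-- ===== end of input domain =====

-- B replaces A's Fenwick tree with an ascending list of the already-seen positive values,
-- queried and maintained by hand-written binary searches (objective: simpler).

-- i & (-i) for 0 < i is positive and at most i: the termination argument of both Fenwick loops.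
theorem band_neg_pos {i : Int} (h : 0 < i) :
    0 < PySem.Int.band i (-i) ∧ PySem.Int.band i (-i) ≤ i := by
  have hm : i = ((i.toNat : Nat) : Int) := by omega
  have h0 : (0:Int) ≤ i := le_of_lt h
  have hnb : ¬ (0:Int) ≤ -i := by omega
  have hland : i.toNat &&& (i.toNat - 1) < i.toNat := by
    have := Nat.and_le_right (n := i.toNat) (m := i.toNat - 1)
    omega
  simp only [PySem.Int.band, if_pos h0, if_neg hnb]
  have : (-(-i) - 1).toNat = i.toNat - 1 := by omega
  rw [this]
  constructor <;> [exact_mod_cast Nat.sub_pos_of_lt hland; omega]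

-- ===== PORT A =====
-- 'update(bit, i, v)': while i < len(bit): bit[i] += v; i += i & (-i).
-- The extra '0 < i & (-i)' in the guard only makes the recursion total: it fails
-- exactly when i = 0, where the Python loop never terminates.
def pyUpdate (bit : List Int) (i : Int) (v : Int) : List Int :=
  if _h : i < PySem.List.len bit ∧ 0 < PySem.Int.band i (-i) then
    pyUpdate (PySem.List.pySetD bit i (PySem.List.pyGetD bit i 0 + v))
      (i + PySem.Int.band i (-i)) v
  else bit
termination_by (PySem.List.len bit - i).toNat
decreasing_by
  simp only [PySem.List.len_eq, PySem.List.length_pySetD] at *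
  omega

-- 'getsum(bit, i)': s = 0; while i > 0: s += bit[i]; i -= i & (-i); return s
def pyGetsumLoop (bit : List Int) (i : Int) (s : Int) : Int :=
  if _h : 0 < i then
    pyGetsumLoop bit (i - PySem.Int.band i (-i)) (s + PySem.List.pyGetD bit i 0)
  else s
termination_by i.toNat
decreasing_by
  have := band_neg_pos _h
  omega

def getsum (bit : List Int) (i : Int) : Int := pyGetsumLoop bit i 0

-- the body of A's main loop 'for i in range(n-1, -1, -1)', state (bit, nP)
def stepA (P nI : List Int) (st : List Int × List Int) (i : Int) : List Int × List Int :=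
  let p := PySem.List.pyGetD P i 0
  if p > 0 then
    (pyUpdate st.1 p 1,
     PySem.List.pySetD st.2 i (PySem.List.pyGetD nI (p - 1) 0 - getsum st.1 (p - 1)))
  else (st.1, PySem.List.pySetD st.2 i (-1))

def getnP (P : List Int) (fixed : List Int) : List Int :=
  let n := PySem.List.len P
  match PySem.List.max? P (fun x => x) with
  | none => []   -- max([]) raises ValueError; excluded by Pre_getnP
  | some m =>
    let nI := (PySem.List.pyRange 2 (n + 1) 1).foldl
      (fun nI i => nI ++ [PySem.List.pyGetD nI (-1) 0 + PySem.List.pyGetD fixed (i - 2) 0]) [0]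
    -- '[0 for i in range(m+1)]' is the all-zero list of length max(m+1, 0)
    let bit : List Int := List.replicate (m + 1).toNat 0
    let nP : List Int := List.replicate n.toNat 0
    let st := (PySem.List.pyRange (n - 1) (-1) (-1)).foldl (stepA P nI) (bit, nP)
    PySem.List.pySetD st.2 0 0

-- ===== PORT B =====
-- '_count_less': lo, hi bisection with 'if seen[mid] < x: lo = mid+1 else hi = mid'
def bisectLeftLoop (seen : List Int) (x lo hi : Int) : Int :=
  if h : lo < hi then
    let mid := PySem.Int.floordiv (lo + hi) 2
    if PySem.List.pyGetD seen mid 0 < x then bisectLeftLoop seen x (mid + 1) hi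
    else bisectLeftLoop seen x lo mid
  else lo
termination_by (hi - lo).toNat
decreasing_by
  all_goals simp only [PySem.Int.floordiv]
  all_goals rw [Int.fdiv_eq_ediv]
  all_goals simp
  all_goals omega

def countLess (seen : List Int) (x : Int) : Int :=
  bisectLeftLoop seen x 0 (PySem.List.len seen)

-- '_insert_sorted': bisection with 'if x < seen[mid]: hi = mid else lo = mid+1', then seen.insert(lo, x)
def bisectRightLoop (seen : List Int) (x lo hi : Int) : Int :=
  if h : lo < hi then
    let mid := PySem.Int.floordiv (lo + hi) 2
    if x < PySem.List.pyGetD seen mid 0 then bisectRightLoop seen x lo mid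
    else bisectRightLoop seen x (mid + 1) hi
  else lo
termination_by (hi - lo).toNat
decreasing_by
  all_goals simp only [PySem.Int.floordiv]
  all_goals rw [Int.fdiv_eq_ediv]
  all_goals simp
  all_goals omega

def insertSorted (seen : List Int) (x : Int) : List Int :=
  PySem.List.insert seen (bisectRightLoop seen x 0 (PySem.List.len seen)) x

-- the body of B's main loop, state (seen, nP)
def stepB (P nI : List Int) (st : List Int × List Int) (i : Int) : List Int × List Int :=
  let p := PySem.List.pyGetD P i 0
  if p > 0 then
    (insertSorted st.1 p,
     PySem.List.pySetD st.2 i (PySem.List.pyGetD nI (p - 1) 0 - countLess st.1 p))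
  else (st.1, PySem.List.pySetD st.2 i (-1))

def getnP_alt (P : List Int) (fixed : List Int) : List Int :=
  let n := PySem.List.len P
  let nI := ((PySem.List.slice fixed none (some (n - 1))).foldl
    (fun (st : List Int × Int) v => (st.1 ++ [st.2 + v], st.2 + v)) ([0], 0)).1
  let nP : List Int := List.replicate n.toNat 0
  let st := (PySem.List.pyRange (n - 1) (-1) (-1)).foldl (stepB P nI) (([] : List Int), nP)
  PySem.List.pySetD st.2 0 0

-- ===== PRECONDITION & SPEC =====
-- Pre_getnP is exactly the set of inputs where A returns: P nonempty (max([]) raises ValueError),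
-- fixed long enough for the nI loop, and every positive entry of P at most len(P) (else nI[P[i]-1]
-- raises IndexError).
def Pre_getnP (P : List Int) (fixed : List Int) : Prop :=
  P ≠ [] ∧ (P.length : Int) - 1 ≤ (fixed.length : Int) ∧ ∀ x ∈ P, 0 < x → x ≤ (P.length : Int)
instance (P : List Int) (fixed : List Int) : Decidable (Pre_getnP P fixed) := by
  unfold Pre_getnP; infer_instance

def pvWitness_getnP : List Int × List Int := ([2, 1], [3])

def Spec_getnP (P : List Int) (fixed : List Int) (out : List Int) : Prop := out = getnP_alt P fixed
instance (P : List Int) (fixed : List Int) (out : List Int) : Decidable (Spec_getnP P fixed out) := by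
  unfold Spec_getnP; infer_instance

-- ===== CLAIM (what is proved, stated in full; the proofs are below) =====
def Claim_equal_getnP : Prop := ∀ (P : List Int) (fixed : List Int),
  Dom_getnP P fixed → Pre_getnP P fixed → Spec_getnP P fixed (getnP P fixed)
-- ===== LEMMAS AND PROOFS =====

def lowN (m : Nat) : Nat :=
  if m = 0 then 0 else if m % 2 = 1 then 1 else 2 * lowN (m / 2)
decreasing_by omega

theorem lowN_odd {m : Nat} (h : m % 2 = 1) : lowN m = 1 := by
  rw [lowN]; simp [h]; omega

theorem lowN_even {m : Nat} (h0 : m ≠ 0) (h : m % 2 = 0) : lowN m = 2 * lowN (m / 2) := by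
  rw [lowN]; simp [h0, h]

theorem lowN_pos {m : Nat} (h : 0 < m) : 0 < lowN m := by
  induction m using Nat.strong_induction_on with
  | _ m ih =>
    rcases Nat.mod_two_eq_zero_or_one m with he | ho
    · rw [lowN_even (by omega) (by omega)]
      have := ih (m / 2) (by omega) (by omega)
      omega
    · rw [lowN_odd (by omega)]; omega

theorem lowN_le {m : Nat} : lowN m ≤ m := by
  induction m using Nat.strong_induction_on with
  | _ m ih =>
    rcases Nat.eq_zero_or_pos m with h0 | h0
    · subst h0; rw [lowN]; simp
    rcases Nat.mod_two_eq_zero_or_one m with he | ho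
    · rw [lowN_even (by omega) (by omega)]
      have := ih (m / 2) (by omega)
      omega
    · rw [lowN_odd (by omega)]; omega

theorem lowN_gap {c : Nat} (hc : 0 < c) : ∀ j, c < j → j < c + lowN c → c ≤ j - lowN j := by
  induction c using Nat.strong_induction_on with
  | _ c ih =>
    intro j h1 h2
    rcases Nat.mod_two_eq_zero_or_one c with he | ho
    · rw [lowN_even (by omega) (by omega)] at h2
      rcases Nat.mod_two_eq_zero_or_one j with hje | hjo
      · have hj2 : 0 < j / 2 := by omega
        have := ih (c / 2) (by omega) (by omega) (j / 2) (by omega) (by omega)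
        have hle : lowN (j / 2) ≤ j / 2 := lowN_le
        rw [lowN_even (by omega) (by omega)]
        omega
      · rw [lowN_odd (m := j) (by omega)]
        omega
    · rw [lowN_odd (m := c) (by omega)] at h2
      omega

theorem lowN_inv {c : Nat} (hc : 0 < c) : ∀ j, c + lowN c ≤ j → j - lowN j < c + lowN c →
    j - lowN j < c := by
  induction c using Nat.strong_induction_on with
  | _ c ih =>
    intro j h1 h2
    have hjpos : 0 < j := by have := lowN_pos hc; omega
    rcases Nat.mod_two_eq_zero_or_one c with he | ho
    · have hc2 : 0 < c / 2 := by omega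
      have hcl : lowN c = 2 * lowN (c / 2) := lowN_even (by omega) (by omega)
      rcases Nat.mod_two_eq_zero_or_one j with hje | hjo
      · have hjl : lowN j = 2 * lowN (j / 2) := lowN_even (by omega) (by omega)
        have hle : lowN (j / 2) ≤ j / 2 := lowN_le
        have := ih (c / 2) (by omega) hc2 (j / 2) (by omega) (by omega)
        omega
      · rw [lowN_odd (m := j) (by omega)] at h2 ⊢
        rw [hcl] at h1 h2
        have : lowN (c/2) ≤ c/2 := lowN_le
        omega
    · rw [lowN_odd (m := c) (by omega)] at h1 h2
      have hlej : lowN j ≤ j := lowN_le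
      rcases Nat.mod_two_eq_zero_or_one j with hje | hjo
      · have hjl : lowN j = 2 * lowN (j / 2) := lowN_even (by omega) (by omega)
        have : lowN (j/2) ≤ j/2 := lowN_le
        omega
      · rw [lowN_odd (m := j) (by omega)]
        rw [lowN_odd (m := j) (by omega)] at h2
        omega

theorem land_arith (a b : Nat) (x y : Bool) :
    (2*a + cond x 1 0) &&& (2*b + cond y 1 0) = 2*(a &&& b) + cond (x && y) 1 0 := by
  have := Nat.land_bit x a y b
  simp only [Nat.bit] at this
  cases x <;> cases y <;> simpa [Nat.two_mul] using this

theorem land_pred_sub (m : Nat) (h : 0 < m) : m - (m &&& (m - 1)) = lowN m := by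
  induction m using Nat.strong_induction_on with
  | _ m ih =>
    rcases Nat.mod_two_eq_zero_or_one m with he | ho
    · obtain ⟨k, hk⟩ : ∃ k, m = 2 * k := ⟨m / 2, by omega⟩
      have hkpos : 0 < k := by omega
      have hl : m &&& (m - 1) = 2 * (k &&& (k - 1)) := by
        have h2 : m - 1 = 2 * (k - 1) + 1 := by omega
        rw [h2, hk]
        have := land_arith k (k - 1) false true
        simpa using this
      have hland : k &&& (k - 1) ≤ k - 1 := Nat.and_le_right
      have hih := ih k (by omega) hkpos
      rw [lowN_even (by omega) he]
      have : m / 2 = k := by omega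
      rw [this]
      omega
    · obtain ⟨k, hk⟩ : ∃ k, m = 2 * k + 1 := ⟨m / 2, by omega⟩
      have hl : m &&& (m - 1) = 2 * k := by
        have h2 : m - 1 = 2 * k := by omega
        rw [h2, hk]
        have := land_arith k k true false
        simpa [Nat.and_self] using this
      rw [lowN_odd ho]
      omega

theorem band_eq_lowN {i : Int} (h : 0 < i) :
    PySem.Int.band i (-i) = ((lowN i.toNat : Nat) : Int) := by
  have h0 : (0:Int) ≤ i := le_of_lt h
  have hnb : ¬ (0:Int) ≤ -i := by omega
  simp only [PySem.Int.band, if_pos h0, if_neg hnb]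
  have h2 : (-(-i) - 1).toNat = i.toNat - 1 := by omega
  rw [h2, land_pred_sub i.toNat (by omega)]

-- the Fenwick chain step, as one equivalence
theorem chain_step {c j : Nat} (hc : 0 < c) (hj : j ≠ c) :
    (c ≤ j ∧ j - lowN j < c) ↔ (c + lowN c ≤ j ∧ j - lowN j < c + lowN c) := by
  constructor
  · rintro ⟨h1, h2⟩
    have hcj : c < j := lt_of_le_of_ne h1 (Ne.symm hj)
    constructor
    · by_contra hlt
      have := lowN_gap hc j hcj (by omega)
      omega
    · have := lowN_pos hc; omega
  · rintro ⟨h1, h2⟩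
    have hL := lowN_pos hc
    exact ⟨by omega, lowN_inv hc j h1 h2⟩

theorem pyUpdate_length (bit : List Int) (i v : Int) : (pyUpdate bit i v).length = bit.length := by
  induction bit, i using pyUpdate.induct (v := v) with
  | case1 bit i h ih =>
    rw [pyUpdate, dif_pos h]
    rw [ih, PySem.List.length_pySetD]
  | case2 bit i h => rw [pyUpdate, dif_neg h]

theorem pyUpdate_getD (bit : List Int) (i v : Int) :
    0 < i → ∀ j : Nat,
      (pyUpdate bit i v).getD j 0 =
        bit.getD j 0 + (if i.toNat ≤ j ∧ j - lowN j < i.toNat ∧ j < bit.length then v else 0) := by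
  induction bit, i using pyUpdate.induct (v := v) with
  | case1 bit i h ih =>
    intro hi j
    have hband := band_eq_lowN hi
    set c := i.toNat with hc
    have hic : i = (c : Int) := by omega
    have hLpos : 0 < lowN c := lowN_pos (by omega)
    have hLle : lowN c ≤ c := lowN_le
    have hclen : (c : Int) < (bit.length : Int) := by
      have := h.1; simp only [PySem.List.len_eq] at this; omega
    rw [pyUpdate, dif_pos h]
    have hske : PySem.List.pySetD bit i (PySem.List.pyGetD bit i 0 + v) = bit.set c (bit.getD c 0 + v) := by
      rw [hic, PySem.List.pyGetD_natCast, PySem.List.pySetD_natCast]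
    have hi' : 0 < i + PySem.Int.band i (-i) := by omega
    have := ih hi' j
    rw [hske] at this ⊢
    rw [this]
    have htonat : (i + PySem.Int.band i (-i)).toNat = c + lowN c := by
      rw [hband]; omega
    rw [htonat]
    have hlen : (bit.set c (bit.getD c 0 + v)).length = bit.length := by simp
    rw [hlen]
    by_cases hjc : j = c
    · rw [hjc]
      have hgd : (bit.set c (bit.getD c 0 + v)).getD c 0 = bit.getD c 0 + v := by
        have hjlen : c < bit.length := by omega
        simp [List.getD, hjlen]
      rw [hgd]
      rw [if_neg (by omega), if_pos ⟨le_refl c, by omega, by omega⟩]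
      ring
    · have hgd : (bit.set c (bit.getD c 0 + v)).getD j 0 = bit.getD j 0 := by
        simp [List.getD, List.getElem?_set_ne (by omega : c ≠ j)]
      rw [hgd]
      by_cases hjlen : j < bit.length
      · congr 1
        by_cases hcond : c ≤ j ∧ j - lowN j < c
        · rw [if_pos ⟨((chain_step (by omega) hjc).mp hcond).1, ((chain_step (by omega) hjc).mp hcond).2, hjlen⟩,
              if_pos ⟨hcond.1, hcond.2, hjlen⟩]
        · have hnot : ¬ (c + lowN c ≤ j ∧ j - lowN j < c + lowN c) := by
            intro hx; exact hcond ((chain_step (by omega) hjc).mpr hx)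
          rw [if_neg (by tauto), if_neg (by tauto)]
      · rw [if_neg (by tauto), if_neg (by tauto)]
  | case2 bit i h =>
    intro hi j
    rw [pyUpdate, dif_neg h]
    have hband := band_neg_pos hi
    have : ¬ (i < PySem.List.len bit) := by tauto
    simp only [PySem.List.len_eq] at this
    rw [if_neg (by omega)]
    ring

-- the Fenwick invariant: entry j holds the number of inserted values in (j - lowN j, j]
def SInv (S : List Int) (bit : List Int) : Prop :=
  ∀ j : Nat, 0 < j → j < bit.length →
    bit.getD j 0 = (S.countP (fun v => decide (((j - lowN j : Nat) : Int) < v ∧ v ≤ (j : Int))) : Int)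

theorem SInv_nil (k : Nat) : SInv [] (List.replicate k 0) := by
  intro j hj hjl
  simp

theorem SInv_update {S bit : List Int} (hInv : SInv S bit) {p : Int} (hp : 0 < p) :
    SInv (p :: S) (pyUpdate bit p 1) := by
  intro j hj hjl
  rw [pyUpdate_length] at hjl
  rw [pyUpdate_getD bit p 1 hp j, hInv j hj hjl]
  rw [List.countP_cons]
  have hlowle : lowN j ≤ j := lowN_le
  by_cases hc : p.toNat ≤ j ∧ j - lowN j < p.toNat ∧ j < bit.length
  · rw [if_pos hc]
    have : decide (((j : Nat) - lowN j : Nat) < p ∧ p ≤ (j : Int)) = true := by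
      simp only [decide_eq_true_eq]
      constructor <;> [push_cast; skip] <;> omega
    rw [this, if_pos rfl]
    omega
  · rw [if_neg hc]
    have : decide (((j : Nat) - lowN j : Nat) < p ∧ p ≤ (j : Int)) = false := by
      simp only [decide_eq_false_iff_not, not_and]
      intro h1 h2
      exact hc ⟨by omega, by omega, hjl⟩
    rw [this, if_neg (by simp)]
    omega

theorem countP_split (S : List Int) (a b : Int) (ha : 0 ≤ a) (hab : a ≤ b) :
    S.countP (fun v => decide (0 < v ∧ v ≤ b)) =
      S.countP (fun v => decide (a < v ∧ v ≤ b)) + S.countP (fun v => decide (0 < v ∧ v ≤ a)) := by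
  induction S with
  | nil => simp
  | cons v t ih =>
    simp only [List.countP_cons, ih]
    split_ifs with h1 h2 h3 h4 h5 h6 h7 <;>
      simp only [decide_eq_true_eq, Decidable.not_and_iff_not_or_not] at * <;>
      omega

theorem pyGetsumLoop_acc (bit : List Int) : ∀ (i s : Int),
    pyGetsumLoop bit i s = s + pyGetsumLoop bit i 0 := by
  intro i
  induction hn : i.toNat using Nat.strong_induction_on generalizing i with
  | _ n ih =>
    intro s
    by_cases hi : 0 < i
    · have hb := band_neg_pos hi
      rw [pyGetsumLoop, dif_pos hi]
      conv_rhs => rw [pyGetsumLoop, dif_pos hi]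
      rw [ih (i - PySem.Int.band i (-i)).toNat (by omega) _ rfl,
          ih (i - PySem.Int.band i (-i)).toNat (by omega) _ rfl (0 + PySem.List.pyGetD bit i 0)]
      ring
    · rw [pyGetsumLoop, dif_neg hi]
      conv_rhs => rw [pyGetsumLoop, dif_neg hi]
      ring

theorem getsum_count {S bit : List Int} (hInv : SInv S bit) :
    ∀ x : Nat, x < bit.length →
      getsum bit (x : Int) = (S.countP (fun v => decide (0 < v ∧ v ≤ (x : Int))) : Int) := by
  intro x
  induction x using Nat.strong_induction_on with
  | _ x ih =>
    intro hxl
    unfold getsum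
    rcases Nat.eq_zero_or_pos x with h0 | h0
    · subst h0
      rw [pyGetsumLoop, dif_neg (by omega)]
      have : S.countP (fun v => decide (0 < v ∧ v ≤ ((0:Nat) : Int))) = 0 := by
        apply List.countP_eq_zero.mpr
        intro v _
        simp only [decide_eq_true_eq]
        omega
      rw [this]; rfl
    · have hxpos : (0:Int) < (x : Int) := by omega
      rw [pyGetsumLoop, dif_pos hxpos]
      rw [pyGetsumLoop_acc]
      have hband := band_eq_lowN hxpos
      have hlow : ((x:Int)).toNat = x := by omega
      rw [hlow] at hband
      have hLpos := lowN_pos h0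
      have hLle : lowN x ≤ x := lowN_le
      have hsub : (x : Int) - PySem.Int.band (x:Int) (-(x:Int)) = ((x - lowN x : Nat) : Int) := by
        rw [hband]; push_cast; omega
      rw [hsub]
      have hrec := ih (x - lowN x) (by omega) (by omega)
      unfold getsum at hrec
      rw [hrec]
      have hget : PySem.List.pyGetD bit ((x:Nat) : Int) 0 = bit.getD x 0 := PySem.List.pyGetD_natCast bit x 0
      rw [hget, hInv x h0 hxl]
      have := countP_split S ((x - lowN x : Nat) : Int) (x : Int) (by positivity) (by push_cast; omega)
      rw [this]
      push_cast
      ring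

-- ============ binary searches on a sorted list ============
theorem count_pos_iff {p : Int → Bool} (hmono : ∀ v w : Int, v ≤ w → p w = true → p v = true) :
    ∀ (seen : List Int), seen.Pairwise (· ≤ ·) →
      ∀ k (hk : k < seen.length), (k < seen.countP p ↔ p seen[k] = true) := by
  intro seen
  induction seen with
  | nil => intro _ k hk; simp at hk
  | cons a t ih =>
    intro hs k hk
    have ha : ∀ b ∈ t, a ≤ b := by
      intro b hb; exact (List.pairwise_cons.mp hs).1 b hb
    have ht : t.Pairwise (· ≤ ·) := (List.pairwise_cons.mp hs).2
    rw [List.countP_cons]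
    by_cases hpa : p a = true
    · rw [if_pos hpa]
      match k with
      | 0 => simpa using hpa
      | k + 1 =>
        simp only [List.getElem_cons_succ]
        rw [← ih ht k (by simpa using hk)]
        omega
    · have hz : t.countP p = 0 := by
        apply List.countP_eq_zero.mpr
        intro b hb hpb
        exact hpa (hmono a b (ha b hb) hpb)
      rw [if_neg hpa, hz]
      match k with
      | 0 => simpa using hpa
      | k + 1 =>
        simp only [List.getElem_cons_succ]
        constructor
        · omega
        · intro hpb
          have hkt : k < t.length := by simpa using hk
          exact absurd (hmono a (t[k]'hkt) (ha _ (List.getElem_mem hkt)) hpb) hpa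

theorem floordiv_two (a : Int) : PySem.Int.floordiv a 2 = a / 2 := by
  simp only [PySem.Int.floordiv]
  rw [Int.fdiv_eq_ediv]
  simp

theorem bisectLeftLoop_eq (seen : List Int) (x : Int) (hs : seen.Pairwise (· ≤ ·)) :
    ∀ (n : Nat) (lo hi : Int), (hi - lo).toNat = n → 0 ≤ lo → hi ≤ (seen.length : Int) →
      lo ≤ (seen.countP (fun v => decide (v < x)) : Int) →
      ((seen.countP (fun v => decide (v < x))) : Int) ≤ hi →
      bisectLeftLoop seen x lo hi = (seen.countP (fun v => decide (v < x)) : Int) := by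
  have hmono : ∀ v w : Int, v ≤ w → decide (w < x) = true → decide (v < x) = true := by
    intro v w h1 h2; simp only [decide_eq_true_eq] at *; omega
  intro n
  induction n using Nat.strong_induction_on with
  | _ n ih =>
    intro lo hi hn h0 hlen hloC hChi
    by_cases hlt : lo < hi
    · rw [bisectLeftLoop, dif_pos hlt]
      set mid := PySem.Int.floordiv (lo + hi) 2 with hmid
      have hmid2 : mid = (lo + hi) / 2 := by rw [hmid, floordiv_two]
      have hmlo : lo ≤ mid := by omega
      have hmhi : mid < hi := by omega
      have hmlen : mid.toNat < seen.length := by omega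
      have hget : PySem.List.pyGetD seen mid 0 = seen[mid.toNat] :=
        PySem.List.pyGetD_eq_getElem seen 0 (by omega) (by push_cast; omega)
      have hiff := count_pos_iff hmono seen hs mid.toNat hmlen
      by_cases hless : PySem.List.pyGetD seen mid 0 < x
      · rw [if_pos hless]
        have hcnt : mid.toNat < seen.countP (fun v => decide (v < x)) := by
          apply hiff.mpr
          rw [← hget]
          simpa using hless
        exact ih (hi - (mid + 1)).toNat (by omega) (mid + 1) hi rfl (by omega) hlen (by omega) hChi
      · rw [if_neg hless]
        have hcnt : ¬ mid.toNat < seen.countP (fun v => decide (v < x)) := by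
          intro hc
          have := hiff.mp hc
          rw [← hget] at this
          simp only [decide_eq_true_eq] at this
          exact hless this
        exact ih (mid - lo).toNat (by omega) lo mid rfl h0 (by omega) hloC (by omega)
    · rw [bisectLeftLoop, dif_neg hlt]
      omega

theorem countLess_eq (seen : List Int) (x : Int) (hs : seen.Pairwise (· ≤ ·)) :
    countLess seen x = (seen.countP (fun v => decide (v < x)) : Int) := by
  unfold countLess
  have hc : seen.countP (fun v => decide (v < x)) ≤ seen.length := List.countP_le_length
  apply bisectLeftLoop_eq seen x hs _ 0 (PySem.List.len seen) rfl (by omega) (by simp) (by positivity)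
  simp only [PySem.List.len_eq]
  omega

theorem bisectRightLoop_eq (seen : List Int) (x : Int) (hs : seen.Pairwise (· ≤ ·)) :
    ∀ (n : Nat) (lo hi : Int), (hi - lo).toNat = n → 0 ≤ lo → hi ≤ (seen.length : Int) →
      lo ≤ (seen.countP (fun v => decide (v ≤ x)) : Int) →
      ((seen.countP (fun v => decide (v ≤ x))) : Int) ≤ hi →
      bisectRightLoop seen x lo hi = (seen.countP (fun v => decide (v ≤ x)) : Int) := by
  have hmono : ∀ v w : Int, v ≤ w → decide (w ≤ x) = true → decide (v ≤ x) = true := by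
    intro v w h1 h2; simp only [decide_eq_true_eq] at *; omega
  intro n
  induction n using Nat.strong_induction_on with
  | _ n ih =>
    intro lo hi hn h0 hlen hloC hChi
    by_cases hlt : lo < hi
    · rw [bisectRightLoop, dif_pos hlt]
      set mid := PySem.Int.floordiv (lo + hi) 2 with hmid
      have hmid2 : mid = (lo + hi) / 2 := by rw [hmid, floordiv_two]
      have hmlo : lo ≤ mid := by omega
      have hmhi : mid < hi := by omega
      have hmlen : mid.toNat < seen.length := by omega
      have hget : PySem.List.pyGetD seen mid 0 = seen[mid.toNat] :=
        PySem.List.pyGetD_eq_getElem seen 0 (by omega) (by push_cast; omega)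
      have hiff := count_pos_iff hmono seen hs mid.toNat hmlen
      by_cases hless : x < PySem.List.pyGetD seen mid 0
      · rw [if_pos hless]
        have hcnt : ¬ mid.toNat < seen.countP (fun v => decide (v ≤ x)) := by
          intro hc
          have := hiff.mp hc
          rw [← hget] at this
          simp only [decide_eq_true_eq] at this
          omega
        exact ih (mid - lo).toNat (by omega) lo mid rfl h0 (by omega) hloC (by omega)
      · rw [if_neg hless]
        have hcnt : mid.toNat < seen.countP (fun v => decide (v ≤ x)) := by
          apply hiff.mpr
          rw [← hget]
          simp only [decide_eq_true_eq]
          omega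
        exact ih (hi - (mid + 1)).toNat (by omega) (mid + 1) hi rfl (by omega) hlen (by omega) hChi
    · rw [bisectRightLoop, dif_neg hlt]
      omega

theorem insertSorted_eq (seen : List Int) (x : Int) (hs : seen.Pairwise (· ≤ ·)) :
    insertSorted seen x =
      seen.take (seen.countP (fun v => decide (v ≤ x))) ++ x :: seen.drop (seen.countP (fun v => decide (v ≤ x))) := by
  unfold insertSorted
  have hc : seen.countP (fun v => decide (v ≤ x)) ≤ seen.length := List.countP_le_length
  have hr := bisectRightLoop_eq seen x hs _ 0 (PySem.List.len seen) rfl (by omega)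
    (by simp) (by positivity) (by simp only [PySem.List.len_eq]; omega)
  rw [hr, PySem.List.insert_natCast seen _ x hc]

theorem insertSorted_perm (seen : List Int) (x : Int) (hs : seen.Pairwise (· ≤ ·)) :
    (insertSorted seen x).Perm (x :: seen) := by
  rw [insertSorted_eq seen x hs]
  have := List.perm_middle (a := x)
    (l₁ := seen.take (seen.countP (fun v => decide (v ≤ x))))
    (l₂ := seen.drop (seen.countP (fun v => decide (v ≤ x))))
  simpa [List.take_append_drop] using this

theorem insertSorted_sorted (seen : List Int) (x : Int) (hs : seen.Pairwise (· ≤ ·)) :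
    (insertSorted seen x).Pairwise (· ≤ ·) := by
  rw [insertSorted_eq seen x hs]
  set r := seen.countP (fun v => decide (v ≤ x)) with hrdef
  have hrle : r ≤ seen.length := List.countP_le_length
  have hmono : ∀ v w : Int, v ≤ w → decide (v ≤ x) = false → decide (w ≤ x) = false := by
    intro v w h1 h2; simp only [decide_eq_false_iff_not] at *; omega
  have hiff := count_pos_iff (p := fun v => decide (v ≤ x))
    (by intro v w h1 h2; simp only [decide_eq_true_eq] at *; omega) seen hs
  have htake : ∀ a ∈ seen.take r, a ≤ x := by
    intro a hmem
    obtain ⟨j, hj, hja⟩ := List.mem_take_iff_getElem.mp hmem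
    have := (hiff j (by omega)).mp (by omega)
    simp only [decide_eq_true_eq] at this
    omega
  have hdrop : ∀ b ∈ seen.drop r, x ≤ b := by
    intro b hmem
    obtain ⟨k, hk, hkb⟩ := List.mem_iff_getElem.mp hmem
    have hlen : k < (seen.drop r).length := hk
    rw [List.getElem_drop] at hkb
    have hge : ¬ (r + k) < r := by omega
    have := (hiff (r + k) (by simp at hlen; omega)).not.mp (by omega)
    simp only [decide_eq_true_eq] at this
    omega
  rw [List.pairwise_append]
  refine ⟨hs.sublist (List.take_sublist r seen), ?_, ?_⟩
  · rw [List.pairwise_cons]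
    exact ⟨hdrop, hs.sublist (List.drop_sublist r seen)⟩
  · intro a hma b hmb
    rcases List.mem_cons.mp hmb with hbx | hbd
    · rw [hbx]; exact htake a hma
    · exact le_trans (htake a hma) (hdrop b hbd)

-- ============ the prefix-sum table nI ============
theorem nI_eq (fixed : List Int) : ∀ k : Nat, k ≤ fixed.length →
    (PySem.List.pyRange 2 ((k : Int) + 2) 1).foldl
        (fun nI i => nI ++ [PySem.List.pyGetD nI (-1) 0 + PySem.List.pyGetD fixed (i - 2) 0]) [0] =
      ((fixed.take k).foldl (fun (st : List Int × Int) v => (st.1 ++ [st.2 + v], st.2 + v)) ([0], 0)).1 ∧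
    PySem.List.pyGetD ((fixed.take k).foldl
        (fun (st : List Int × Int) v => (st.1 ++ [st.2 + v], st.2 + v)) ([0], 0)).1 (-1) 0 =
      ((fixed.take k).foldl (fun (st : List Int × Int) v => (st.1 ++ [st.2 + v], st.2 + v)) ([0], 0)).2 := by
  intro k
  induction k with
  | zero =>
    refine fun _ => ⟨?_, ?_⟩
    · rw [show ((0:Nat) : Int) + 2 = 2 by norm_num, PySem.List.pyRange_one_eq_nil (by omega)]
      simp
    · simp only [List.take_zero, List.foldl_nil]
      rw [show ([0] : List Int) = [] ++ [0] by simp, PySem.List.pyGetD_neg_one_append_singleton]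
  | succ k ih =>
    intro hk
    obtain ⟨ih1, ih2⟩ := ih (by omega)
    have hkl : k < fixed.length := by omega
    have htake : fixed.take (k + 1) = fixed.take k ++ [fixed[k]] := by
      rw [List.take_add_one, List.getElem?_eq_getElem hkl]
      rfl
    have hrange : PySem.List.pyRange 2 (((k + 1 : Nat) : Int) + 2) 1 =
        PySem.List.pyRange 2 ((k : Int) + 2) 1 ++ [(k : Int) + 2] := by
      rw [show (((k + 1 : Nat) : Int) + 2) = ((k : Int) + 2) + 1 by push_cast; ring]
      exact PySem.List.pyRange_one_succ_right (by omega)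
    rw [hrange, htake]
    rw [List.foldl_append, List.foldl_append]
    simp only [List.foldl_cons, List.foldl_nil]
    rw [ih1, ih2]
    have hfk : PySem.List.pyGetD fixed ((k : Int) + 2 - 2) 0 = fixed[k] := by
      rw [show ((k : Int) + 2 - 2) = (k : Int) by ring, PySem.List.pyGetD_natCast,
        List.getD_eq_getElem?_getD, List.getElem?_eq_getElem hkl]
      rfl
    rw [hfk]
    exact ⟨rfl, PySem.List.pyGetD_neg_one_append_singleton _ _ _⟩

-- ============ the main loop ============
theorem mainFold (P nI : List Int) (m : Int) (hmax : PySem.List.max? P (fun x => x) = some m) :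
    ∀ (idxs : List Int) (bit seen nP S : List Int),
      bit.length = (m + 1).toNat →
      SInv S bit →
      (∀ v ∈ S, 0 < v) →
      seen.Perm S →
      seen.Pairwise (· ≤ ·) →
      (∀ i ∈ idxs, 0 ≤ i ∧ i < (P.length : Int)) →
      (idxs.foldl (stepA P nI) (bit, nP)).2 = (idxs.foldl (stepB P nI) (seen, nP)).2 := by
  intro idxs
  induction idxs with
  | nil => intro _ _ _ _ _ _ _ _ _ _; rfl
  | cons i rest ih =>
    intro bit seen nP S hlen hInv hSpos hperm hsort hidx
    simp only [List.foldl_cons]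
    have hi := hidx i List.mem_cons_self
    have hrest : ∀ j ∈ rest, 0 ≤ j ∧ j < (P.length : Int) := by
      intro j hj; exact hidx j (List.mem_cons_of_mem i hj)
    simp only [stepA, stepB]
    set p := PySem.List.pyGetD P i 0 with hp
    by_cases hppos : p > 0
    · rw [if_pos hppos, if_pos hppos]
      have hpm : p ≤ m := by
        apply PySem.List.max?_isMax hmax
        apply PySem.List.pyGetD_mem
        exact ⟨by omega, by omega⟩
      -- the two per-position values agree
      have hx : p - 1 = (((p - 1).toNat : Nat) : Int) := by omega
      have hxlen : (p - 1).toNat < bit.length := by omega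
      have hgs : getsum bit (p - 1) = countLess seen p := by
        rw [hx, getsum_count hInv (p - 1).toNat hxlen, countLess_eq seen p hsort,
          hperm.countP_eq]
        congr 1
        apply List.countP_congr
        intro v hv
        have := hSpos v hv
        simp only [decide_eq_true_eq]
        omega
      rw [hgs]
      exact ih (pyUpdate bit p 1) (insertSorted seen p) _ (p :: S)
        (by rw [pyUpdate_length]; exact hlen)
        (SInv_update hInv hppos)
        (by
          intro v hv
          rcases List.mem_cons.mp hv with h | h
          · omega
          · exact hSpos v h)
        ((insertSorted_perm seen p hsort).trans (hperm.cons p))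
        (insertSorted_sorted seen p hsort)
        hrest
    · rw [if_neg hppos, if_neg hppos]
      exact ih bit seen _ S hlen hInv hSpos hperm hsort hrest

theorem getnP_eq_alt (P fixed : List Int) (hne : P ≠ [])
    (hflen : (P.length : Int) - 1 ≤ (fixed.length : Int)) :
    getnP P fixed = getnP_alt P fixed := by
  cases hmax : PySem.List.max? P (fun x => x) with
  | none => exact absurd ((PySem.List.max?_eq_none_iff _ _).mp hmax) hne
  | some m =>
    have hP1 : 1 ≤ P.length := by
      cases P with
      | nil => exact absurd rfl hne
      | cons a t => simp
    simp only [getnP, getnP_alt, hmax, PySem.List.len_eq]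
    have hk : P.length - 1 ≤ fixed.length := by omega
    have hnI := nI_eq fixed (P.length - 1) hk
    have hcast : ((P.length : Int)) + 1 = ((P.length - 1 : Nat) : Int) + 2 := by
      push_cast [hP1]; omega
    have hslice : PySem.List.slice fixed none (some ((P.length : Int) - 1)) =
        fixed.take (P.length - 1) := by
      rw [PySem.List.slice_to fixed (by omega)]
      congr 1
      omega
    rw [hcast, hnI.1, hslice]
    congr 1
    apply mainFold P _ m hmax _ _ _ _ []
    · simp
    · exact SInv_nil _
    · intro v hv; simp at hv
    · exact List.Perm.refl []
    · simp
    · intro i hi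
      rw [PySem.List.mem_pyRange_neg_one] at hi
      omega

-- ===== VERDICT (by name: the statement is the Claim_ definition above) =====
theorem getnP_spec : Claim_equal_getnP := by
  intro P fixed _ hpre
  unfold Pre_getnP at hpre
  unfold Spec_getnP
  exact getnP_eq_alt P fixed hpre.1 hpre.2.1
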